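-- pv_equiv track=rewrite | github.com/ralskwo/CodingTest | BAEKJOON/1034 - 램프/램프.py | max_on_rows
-- ===== SOURCE A (Python) =====
-- def max_on_rows(N, M, lamp_states, K):  # N, M, 램프 상태와 K를 입력으로 받는 함수 정의
--     from collections import Counter  # collections 모듈에서 Counter 클래스를 가져옴
--
--     row_count = Counter(lamp_states)  # 각 행의 상태가 몇 번 나타나는지 세어서 row_count에 저장
--     max_on = 0  # 최대 켜진 행의 수를 저장할 변수 초기화
--
--     for row, count in row_count.items():  # 각 행과 그 행의 개수에 대해 반복
--         zero_count = row.count('0')  # 해당 행에서 0의 개수를 셈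
--         if zero_count <= K and (K - zero_count) % 2 == 0:  # 조건을 만족하는지 확인
--             max_on = max(max_on, count)  # 조건을 만족하면 max_on을 갱신
--
--     return max_on  # 최대 켜진 행의 수 반환
-- ===== SOURCE B (Python) =====
-- def max_on_rows(N, M, lamp_states, K):
--     best = 0
--     prev = None
--     run = 0
--     for row in sorted(lamp_states):
--         if row == prev:
--             run += 1
--         else:
--             if prev is not None:
--                 z = prev.count('0')
--                 if z <= K and (K - z) % 2 == 0:
--                     best = max(best, run)
--             prev = row
--             run = 1
--     if prev is not None:
--         z = prev.count('0')
--         if z <= K and (K - z) % 2 == 0: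
--             best = max(best, run)
--     return best
-- ===== Notes on version B (the rewrite author's own statement) =====
-- stated objective: alternative
-- what changed: Replaces Counter hash-grouping plus a pass over its items by a single sort followed by one adjacency scan that maintains the current run of equal rows and finalizes each run when the row changes or at the end.
import Mathlib
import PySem

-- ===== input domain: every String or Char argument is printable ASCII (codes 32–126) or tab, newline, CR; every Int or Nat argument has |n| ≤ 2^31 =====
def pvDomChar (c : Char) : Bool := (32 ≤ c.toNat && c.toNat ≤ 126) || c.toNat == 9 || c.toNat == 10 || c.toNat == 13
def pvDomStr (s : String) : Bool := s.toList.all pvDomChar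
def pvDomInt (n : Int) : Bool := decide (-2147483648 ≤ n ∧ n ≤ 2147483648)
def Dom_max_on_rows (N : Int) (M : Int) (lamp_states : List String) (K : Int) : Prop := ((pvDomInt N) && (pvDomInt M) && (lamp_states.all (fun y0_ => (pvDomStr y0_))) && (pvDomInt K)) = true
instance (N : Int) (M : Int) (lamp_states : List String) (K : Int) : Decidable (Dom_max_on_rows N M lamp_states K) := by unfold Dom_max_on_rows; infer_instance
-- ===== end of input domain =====

-- B replaces Counter hash-grouping + items pass by sorting once and a single adjacency
-- scan over runs of equal rows (alternative decomposition; same results, not faster).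


-- ===== PORT A =====
-- for row, count in Counter(lamp_states).items(): if row.count('0') <= K and (K - z) % 2 == 0: max_on = max(max_on, count)
def max_on_rows (N : Int) (M : Int) (lamp_states : List String) (K : Int) : Int :=
  (PySem.Dict.counter lamp_states).items.foldl (fun max_on rc =>
    let zero_count : Int := (PySem.Str.count rc.1 "0" : Int)
    if zero_count ≤ K ∧ PySem.Int.mod (K - zero_count) 2 = 0 then max max_on rc.2 else max_on) 0

-- ===== PORT B =====
-- `if z <= K and (K - z) % 2 == 0: best = max(best, run)` for prev = some p (None skips)
def pvFinB (K : Int) (best : Int) (prev : Option String) (run : Int) : Int :=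
  match prev with
  | none => best
  | some p =>
    let z : Int := (PySem.Str.count p "0" : Int)
    if z ≤ K ∧ PySem.Int.mod (K - z) 2 = 0 then max best run else best

-- loop body: if row == prev: run += 1 else: finalize prev; prev, run = row, 1
def pvStepB (K : Int) (st : Int × Option String × Int) (row : String) : Int × Option String × Int :=
  if (some row == st.2.1) then (st.1, st.2.1, st.2.2 + 1)
  else (pvFinB K st.1 st.2.1 st.2.2, some row, 1)

def max_on_rows_alt (N : Int) (M : Int) (lamp_states : List String) (K : Int) : Int :=
  let st := (PySem.List.sorted lamp_states (fun x => x) false).foldl (pvStepB K) (0, none, 0)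
  pvFinB K st.1 st.2.1 st.2.2

-- ===== PRECONDITION & SPEC =====
def Spec_max_on_rows (N : Int) (M : Int) (lamp_states : List String) (K : Int) (out : Int) : Prop := out = max_on_rows_alt N M lamp_states K
instance (N : Int) (M : Int) (lamp_states : List String) (K : Int) (out : Int) : Decidable (Spec_max_on_rows N M lamp_states K out) := by unfold Spec_max_on_rows; infer_instance

-- ===== CLAIM (what is proved, stated in full; the proofs are below) =====
def Claim_equal_max_on_rows : Prop := ∀ (N : Int) (M : Int) (lamp_states : List String) (K : Int), Dom_max_on_rows N M lamp_states K → Spec_max_on_rows N M lamp_states K (max_on_rows N M lamp_states K)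

-- ===== LEMMAS AND PROOFS =====

-- A's per-item update, on (row, count) pairs
def pvStepA (K : Int) (m : Int) (rc : String × Int) : Int :=
  if (PySem.Str.count rc.1 "0" : Int) ≤ K ∧ PySem.Int.mod (K - (PySem.Str.count rc.1 "0" : Int)) 2 = 0 then max m rc.2 else m

-- run decomposition of a list into (element, run length) pairs
def pvGroups : List String → List (String × Int)
  | [] => []
  | b :: s =>
    (b, 1 + ((s.takeWhile (· == b)).length : Int)) :: pvGroups (s.dropWhile (· == b))
termination_by l => l.length
decreasing_by simpa using Nat.lt_succ_of_le (List.length_dropWhile_le _ _)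

theorem pvStepA_lcomm (K : Int) (m : Int) (p q : String × Int) :
    pvStepA K (pvStepA K m p) q = pvStepA K (pvStepA K m q) p := by
  unfold pvStepA; split_ifs <;> simp [max_assoc, max_comm p.2 q.2]

theorem pv_a_char (N M : Int) (ls : List String) (K : Int) :
    max_on_rows N M ls K =
      ((PySem.Set.ofList ls).map (fun k => (k, (ls.count k : Int)))).foldl (pvStepA K) 0 := by
  unfold max_on_rows
  rw [PySem.Dict.items_counter]
  rfl

-- run of equal rows: the counter just advances
theorem pv_repl (K : Int) (k : Nat) (b : String) (best r : Int) :
    List.foldl (pvStepB K) (best, some b, r) (List.replicate k b) = (best, some b, r + (k : Int)) := by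
  induction k generalizing r with
  | zero => simp
  | succ k ih =>
    rw [List.replicate_succ, List.foldl_cons]
    have hstep : pvStepB K (best, some b, r) b = (best, some b, r + 1) := by
      simp [pvStepB]
    rw [hstep, ih]
    congr 1
    push_cast
    ring_nf

theorem pv_takeWhile_repl (s : List String) (b : String) :
    s.takeWhile (· == b) = List.replicate (s.takeWhile (· == b)).length b := by
  rw [List.eq_replicate_length]
  intro x hx
  have := List.mem_takeWhile_imp hx
  simpa using this

theorem pv_not_mem_dropWhile (s : List String) (b : String)
    (h : List.Pairwise (· ≤ ·) s) (hall : ∀ x ∈ s, b ≤ x) :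
    b ∉ s.dropWhile (· == b) := by
  induction s with
  | nil => simp
  | cons a s'' ih =>
    by_cases ha : (a == b) = true
    · rw [List.dropWhile_cons, if_pos ha]
      exact ih (List.pairwise_cons.mp h).2 (fun x hx => hall x (List.mem_cons_of_mem a hx))
    · rw [List.dropWhile_cons, if_neg ha]
      intro hmem
      have hab : a ≠ b := by simpa using ha
      rcases List.mem_cons.mp hmem with h1 | h2
      · exact hab h1.symm
      · have h3 : a ≤ b := (List.pairwise_cons.mp h).1 b h2
        have h4 : b ≤ a := hall a (List.mem_cons_self)
        exact hab (le_antisymm h3 h4)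

theorem pv_groups_cons (b : String) (s : List String) :
    pvGroups (b :: s) =
      (b, 1 + ((s.takeWhile (· == b)).length : Int)) :: pvGroups (s.dropWhile (· == b)) := by
  rw [pvGroups]

-- the B loop, from any state whose pending row does not occur in the rest
theorem pv_tail (K : Int) : ∀ (n : Nat) (s : List String), s.length ≤ n →
    List.Pairwise (· ≤ ·) s → ∀ (best : Int) (prev : Option String) (r : Int),
    (∀ x ∈ s, prev ≠ some x) →
    (fun st : Int × Option String × Int => pvFinB K st.1 st.2.1 st.2.2)
        (List.foldl (pvStepB K) (best, prev, r) s) =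
      List.foldl (pvStepA K) (pvFinB K best prev r) (pvGroups s) := by
  intro n
  induction n with
  | zero =>
    intro s hs _ best prev r _
    cases s with
    | nil =>
      show pvFinB K best prev r = List.foldl (pvStepA K) (pvFinB K best prev r) (pvGroups [])
      rw [pvGroups]; rfl
    | cons a s' => simp at hs
  | succ n ih =>
    intro s hs hp best prev r hprev
    cases s with
    | nil =>
      show pvFinB K best prev r = List.foldl (pvStepA K) (pvFinB K best prev r) (pvGroups [])
      rw [pvGroups]; rfl
    | cons c s' =>
      have hstep : pvStepB K (best, prev, r) c = (pvFinB K best prev r, some c, 1) := by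
        have : (some c == prev) = false := by
          cases prev with
          | none => rfl
          | some p =>
            have hne := hprev c (List.mem_cons_self)
            rw [beq_eq_false_iff_ne]
            exact fun h => hne h.symm
        simp [pvStepB, this]
      set k := (s'.takeWhile (· == c)).length with hk
      set t := s'.dropWhile (· == c) with htdef
      have hsplit : s' = List.replicate k c ++ t := by
        rw [hk, htdef, ← pv_takeWhile_repl, List.takeWhile_append_dropWhile]
      have hps' : List.Pairwise (· ≤ ·) s' := (List.pairwise_cons.mp hp).2
      have hallc : ∀ x ∈ s', c ≤ x := (List.pairwise_cons.mp hp).1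
      have hpt : List.Pairwise (· ≤ ·) t := hps'.sublist (List.dropWhile_sublist _)
      have hcnot : c ∉ t := pv_not_mem_dropWhile s' c hps' hallc
      have htlen : t.length ≤ n := by
        have h1 : t.length ≤ s'.length := List.length_dropWhile_le _ _
        have h2 : s'.length ≤ n := by simpa using Nat.le_of_succ_le_succ hs
        omega
      rw [List.foldl_cons, hstep, pv_groups_cons, ← hk, ← htdef]
      conv_lhs => rw [hsplit]
      rw [List.foldl_append, pv_repl,
        ih t htlen hpt _ (some c) _ (by intro x hx h; exact hcnot (by rw [Option.some.injEq] at h; rwa [h])),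
        List.foldl_cons]
      rfl

theorem pv_b_char (N M : Int) (ls : List String) (K : Int) :
    max_on_rows_alt N M ls K =
      (pvGroups (PySem.List.sorted ls (fun x => x) false)).foldl (pvStepA K) 0 := by
  unfold max_on_rows_alt
  have := pv_tail K (PySem.List.sorted ls (fun x => x) false).length
    (PySem.List.sorted ls (fun x => x) false) le_rfl
    (by simpa using PySem.List.sorted_pairwise ls (fun x => x))
    0 none 0 (by intro x _ h; exact absurd h (by simp))
  simpa [pvFinB] using this

theorem pv_count_split (c : String) (k : Nat) (t : List String) (hc : c ∉ t) (x : String) :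
    (c :: (List.replicate k c ++ t)).count x =
      if x = c then k + 1 else t.count x := by
  by_cases hx : x = c
  · subst hx
    simp [List.count_append, List.count_eq_zero_of_not_mem hc]
  · simp [List.count_append, List.count_replicate, hx, Ne.symm hx]

theorem pv_groups_mem : ∀ (n : Nat) (s : List String), s.length ≤ n →
    List.Pairwise (· ≤ ·) s →
    (∀ p : String × Int, p ∈ pvGroups s ↔ p.1 ∈ s ∧ p.2 = (s.count p.1 : Int)) ∧
      ((pvGroups s).map Prod.fst).Nodup := by
  intro n
  induction n with
  | zero =>
    intro s hs _
    cases s with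
    | nil => exact ⟨by simp [pvGroups], by simp [pvGroups]⟩
    | cons a s' => simp at hs
  | succ n ih =>
    intro s hs hp
    cases s with
    | nil => exact ⟨by simp [pvGroups], by simp [pvGroups]⟩
    | cons c s' =>
      set k := (s'.takeWhile (· == c)).length with hk
      set t := s'.dropWhile (· == c) with htdef
      have hsplit : s' = List.replicate k c ++ t := by
        rw [hk, htdef, ← pv_takeWhile_repl, List.takeWhile_append_dropWhile]
      have hps' : List.Pairwise (· ≤ ·) s' := (List.pairwise_cons.mp hp).2
      have hallc : ∀ x ∈ s', c ≤ x := (List.pairwise_cons.mp hp).1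
      have hpt : List.Pairwise (· ≤ ·) t := hps'.sublist (List.dropWhile_sublist _)
      have hcnot : c ∉ t := pv_not_mem_dropWhile s' c hps' hallc
      have htlen : t.length ≤ n := by
        have h1 : t.length ≤ s'.length := List.length_dropWhile_le _ _
        have h2 : s'.length ≤ n := by simpa using Nat.le_of_succ_le_succ hs
        omega
      obtain ⟨iht, ihnd⟩ := ih t htlen hpt
      constructor
      · intro p
        rw [pv_groups_cons, ← hk, ← htdef, List.mem_cons, iht]
        rw [hsplit]
        by_cases hx : p.1 = c
        · rw [pv_count_split c k t hcnot, if_pos hx]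
          constructor
          · rintro (rfl | ⟨h1, _⟩)
            · refine ⟨by simp, ?_⟩
              push_cast; ring
            · exact absurd (hx ▸ h1) hcnot
          · rintro ⟨_, h2⟩
            left
            have : p.2 = 1 + (k : Int) := by rw [h2]; push_cast; ring
            rw [Prod.ext_iff]
            exact ⟨hx, this⟩
        · rw [pv_count_split c k t hcnot, if_neg hx]
          constructor
          · rintro (rfl | ⟨h1, h2⟩)
            · exact absurd rfl hx
            · exact ⟨by simp [List.mem_append, h1], h2⟩
          · rintro ⟨h1, h2⟩
            right
            refine ⟨?_, h2⟩
            rcases List.mem_cons.mp h1 with h | h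
            · exact absurd h hx
            · rcases List.mem_append.mp h with h | h
              · exact absurd (List.eq_of_mem_replicate h) hx
              · exact h
      · rw [pv_groups_cons, ← hk, ← htdef, List.map_cons]
        refine List.nodup_cons.mpr ⟨?_, ihnd⟩
        intro hmem
        rcases List.mem_map.mp hmem with ⟨p, hp1, hp2⟩
        have := ((iht p).mp hp1).1
        rw [hp2] at this
        exact hcnot this

theorem pv_groups_perm (ls : List String) :
    (pvGroups (PySem.List.sorted ls (fun x => x) false)).Perm
      ((PySem.Set.ofList ls).map (fun k => (k, (ls.count k : Int)))) := by
  set s := PySem.List.sorted ls (fun x => x) false with hsdef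
  have hperm : s.Perm ls := PySem.List.sorted_perm ls (fun x => x) false
  have hp : List.Pairwise (· ≤ ·) s := by
    simpa using PySem.List.sorted_pairwise ls (fun x => x)
  obtain ⟨hmem, hnd⟩ := pv_groups_mem s.length s le_rfl hp
  have hnd1 : (pvGroups s).Nodup := hnd.of_map
  have hnd2 : ((PySem.Set.ofList ls).map (fun k => (k, (ls.count k : Int)))).Nodup :=
    (PySem.Set.nodup_ofList ls).map (fun a b hab => congrArg Prod.fst hab)
  rw [List.perm_ext_iff_of_nodup hnd1 hnd2]
  intro p
  rw [hmem p, List.mem_map]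
  constructor
  · rintro ⟨h1, h2⟩
    refine ⟨p.1, (PySem.Set.mem_ofList _ _).mpr (hperm.mem_iff.mp h1), Prod.ext_iff.mpr ⟨rfl, ?_⟩⟩
    rw [h2, hperm.count_eq]
  · rintro ⟨x, hx1, hx2⟩
    have h1 : p.1 = x := (congrArg Prod.fst hx2).symm
    have h2 : p.2 = (ls.count x : Int) := (congrArg Prod.snd hx2).symm
    subst h1
    exact ⟨hperm.mem_iff.mpr ((PySem.Set.mem_ofList _ _).mp hx1),
      by rw [h2, hperm.count_eq]⟩

-- ===== VERDICT (by name: the statement is the Claim_ definition above) =====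
theorem max_on_rows_spec : Claim_equal_max_on_rows := by
  intro N M ls K _
  unfold Spec_max_on_rows
  rw [pv_a_char, pv_b_char]
  letI : RightCommutative (pvStepA K) := ⟨fun m p q => pvStepA_lcomm K m p q⟩
  exact ((pv_groups_perm ls).foldl_eq 0).symm
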